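-- pv_equiv track=rewrite | github.com/M3RZL9/perf_lab | task1/task1.py | circular_array_path
-- ===== SOURCE A (Python) =====
-- def circular_array_path(n, m):
--     arr = m * [int(i) for i in range(1, n + 1)]
--     path_temp = [0]
--     path = []
--     cnt = 0
--
--     while path_temp[-1] != 1:
--         path_temp.clear()
--         for i in range(cnt, m + cnt):
--             path_temp.append(arr[i])
--             cnt += 1
--         path_temp_copy = path_temp.copy()
--         path.append(path_temp_copy)
--         cnt -= 1
--
--     path_temp.clear()
--
--     for i in range(len(path)):
--         path_temp.append(str(path[i][0]))
--
--     return path_temp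
-- ===== SOURCE B (Python) =====
-- from math import gcd
--
--
-- def circular_array_path(n, m):
--     # Each window starts at index k*(m-1) of the repeated [1..n] array, so its
--     # first value is k*(m-1) % n + 1; the walk closes after n // gcd(n, m-1) windows.
--     g = gcd(n, m - 1)
--     return [str(k * (m - 1) % n + 1) for k in range(n // g)]
-- ===== Notes on version B (the rewrite author's own statement) =====
-- stated objective: faster
-- what changed: Replaces the materialised m*n repeated array and the window-by-window simulation with the closed form: the k-th window's first element is k*(m-1) % n + 1 and there are exactly n // gcd(n, m-1) windows.
-- outside the precondition, e.g. on circular_array_path(0, 2): A raises IndexError, B returns []; on circular_array_path(3, 0): A raises IndexError, B returns ['1', '3', '2']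
import Mathlib
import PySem

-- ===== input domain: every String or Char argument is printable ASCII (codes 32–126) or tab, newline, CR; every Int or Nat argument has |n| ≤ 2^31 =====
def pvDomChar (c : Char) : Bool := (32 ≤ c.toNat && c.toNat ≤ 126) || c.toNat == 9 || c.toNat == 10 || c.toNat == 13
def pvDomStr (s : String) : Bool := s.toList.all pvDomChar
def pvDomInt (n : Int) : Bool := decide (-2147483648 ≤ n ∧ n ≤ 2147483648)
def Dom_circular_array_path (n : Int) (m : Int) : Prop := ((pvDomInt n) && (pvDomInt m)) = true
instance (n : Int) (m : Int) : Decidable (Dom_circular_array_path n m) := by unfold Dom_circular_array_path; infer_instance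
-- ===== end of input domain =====

-- B replaces A's materialised m*n array and window-by-window simulation with the
-- closed form k*(m-1) % n + 1 over n // gcd(n, m-1) windows (asymptotically faster).

-- ===== PORT A =====
-- the while loop, ported with fuel; each iteration builds the next window and appends it to `path`
def pvLoopA (arr : Array Int) (m : Int) : Nat → List Int → List (List Int) → Int → List (List Int)
  | 0, _, path, _ => path
  | fuel + 1, path_temp, path, cnt =>
    -- `path_temp[-1] != 1`: pyGetD's default 0 is only reached where Python raises IndexError (outside Pre_)
    if PySem.List.pyGetD path_temp (-1) 0 ≠ 1 then
      -- `arr[i]`: Python's O(1) list indexing; inside Pre_ the loop only indexes with 0 ≤ i < len(arr)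
      -- (`getD i.toNat 0` is exact there; where Python would raise IndexError we are outside Pre_)
      let w := (PySem.List.pyRange cnt (m + cnt) 1).map (fun i => arr.getD i.toNat 0)
      -- path.append(w): accumulated head-first, reversed once at the end (Python's O(1) append)
      pvLoopA arr m fuel w (w :: path) (cnt + m - 1)
    else path

def circular_array_path (n : Int) (m : Int) : List String :=
  -- arr = m * [int(i) for i in range(1, n + 1)]; list repetition with count ≤ 0 gives [] (m.toNat = 0), as in Python
  let arr : List Int := (List.replicate m.toNat (PySem.List.pyRange 1 (n + 1) 1)).flatten
  -- the while loop, with fuel: inside Pre_ it performs at most n iterations, so fuel is never exhausted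
  let path := (pvLoopA arr.toArray m (n.toNat + 1) [0] [] 0).reverse
  -- for i in range(len(path)): path_temp.append(str(path[i][0]))
  path.map (fun w => PySem.Int.toStr (PySem.List.pyGetD w 0 0))

-- ===== PORT B =====
def circular_array_path_alt (n : Int) (m : Int) : List String :=
  let g : Int := Int.gcd n (m - 1)
  (PySem.List.pyRange 0 (PySem.Int.floordiv n g) 1).map
    (fun k => PySem.Int.toStr (PySem.Int.mod (k * (m - 1)) n + 1))

-- ===== PRECONDITION & SPEC =====
-- Python A raises IndexError whenever n ≤ 0 or m ≤ 0 (the repeated array or the first window is empty).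
def Pre_circular_array_path (n : Int) (m : Int) : Prop := 1 ≤ n ∧ 1 ≤ m
instance (n : Int) (m : Int) : Decidable (Pre_circular_array_path n m) := by unfold Pre_circular_array_path; infer_instance
def pvWitness_circular_array_path : Int × Int := (3, 2)

def Spec_circular_array_path (n : Int) (m : Int) (out : List String) : Prop := out = circular_array_path_alt n m
instance (n : Int) (m : Int) (out : List String) : Decidable (Spec_circular_array_path n m out) := by unfold Spec_circular_array_path; infer_instance

-- ===== CLAIM (what is proved, stated in full; the proofs are below) =====
def Claim_equal_circular_array_path : Prop := ∀ (n : Int) (m : Int), Dom_circular_array_path n m → Pre_circular_array_path n m → Spec_circular_array_path n m (circular_array_path n m)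

-- ===== LEMMAS AND PROOFS =====

-- N ∣ k*M ↔ (N / gcd N M) ∣ k, stated with g, K, M' abstract
lemma pv_dvd_iff' (g K M' k : Nat) (hg : 0 < g) (hco : Nat.Coprime K M') :
    g * K ∣ k * (g * M') ↔ K ∣ k := by
  constructor
  · rintro ⟨a, ha⟩
    have h1 : k * M' = K * a := by
      refine Nat.eq_of_mul_eq_mul_left hg ?_
      calc g * (k * M') = k * (g * M') := by ring
        _ = g * K * a := ha
        _ = g * (K * a) := by ring
    exact hco.dvd_of_dvd_mul_right ⟨a, h1⟩
  · rintro ⟨t, ht⟩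
    exact ⟨t * M', by rw [ht]; ring⟩

lemma pv_dvd_iff (N M k : Nat) (hN : 0 < N) :
    N ∣ k * M ↔ (N / Nat.gcd N M) ∣ k := by
  have hg0 : 0 < Nat.gcd N M := Nat.gcd_pos_of_pos_left _ hN
  have hco : Nat.Coprime (N / Nat.gcd N M) (M / Nat.gcd N M) :=
    Nat.coprime_div_gcd_div_gcd hg0
  have hN' : Nat.gcd N M * (N / Nat.gcd N M) = N := Nat.mul_div_cancel' (Nat.gcd_dvd_left _ _)
  have hM' : Nat.gcd N M * (M / Nat.gcd N M) = M := Nat.mul_div_cancel' (Nat.gcd_dvd_right _ _)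
  have key := pv_dvd_iff' (Nat.gcd N M) (N / Nat.gcd N M) (M / Nat.gcd N M) k hg0 hco
  rw [hN', hM'] at key
  exact key

lemma pv_flat_get? {α : Type} (l : List α) : ∀ (c k : Nat), k < c * l.length →
    ((List.replicate c l).flatten)[k]? = l[k % l.length]?
  | 0, k, h => by simp at h
  | c + 1, k, h => by
    have hl : 0 < l.length := by by_contra h0; simp [Nat.eq_zero_of_not_pos h0] at h
    simp only [List.replicate_succ, List.flatten_cons]
    by_cases hk : k < l.length
    · rw [List.getElem?_append_left hk, Nat.mod_eq_of_lt hk]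
    · rw [Nat.not_lt] at hk
      rw [List.getElem?_append_right hk, Nat.mod_eq_sub_mod hk]
      exact pv_flat_get? l c (k - l.length) (by
        have h2 : (c + 1) * l.length = c * l.length + l.length := by ring
        omega)

lemma pv_arr_len (n m : Int) :
    ((List.replicate m.toNat (PySem.List.pyRange 1 (n + 1) 1)).flatten).length
      = m.toNat * n.toNat := by
  simp [PySem.List.length_pyRange_one]

lemma pv_arr_get (n m i : Int) (hn : 1 ≤ n) (hm : 1 ≤ m) (h0 : 0 ≤ i) (h1 : i < m * n) :
    ((List.replicate m.toNat (PySem.List.pyRange 1 (n + 1) 1)).flatten).toArray.getD i.toNat 0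
      = i % n + 1 := by
  have hbl : (PySem.List.pyRange 1 (n + 1) 1).length = n.toNat := by
    simp [PySem.List.length_pyRange_one]
  have harr := pv_arr_len n m
  have hcast : ((m.toNat * n.toNat : Nat) : Int) = m * n := by
    push_cast
    rw [Int.toNat_of_nonneg (by omega), Int.toNat_of_nonneg (by omega)]
  have hlt : i.toNat < m.toNat * n.toNat := by omega
  have hmod : i.toNat % n.toNat < n.toNat := Nat.mod_lt _ (by omega)
  rw [Array.getD_eq_getD_getElem?, List.getElem?_toArray]
  have hget := pv_flat_get? (PySem.List.pyRange 1 (n + 1) 1) m.toNat i.toNat (by rw [hbl]; exact hlt)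
  rw [hbl, PySem.List.getElem?_pyRange_one,
    if_pos (by omega : i.toNat % n.toNat < (n + 1 - 1).toNat)] at hget
  rw [hget, Option.getD_some]
  have h3 : (↑(i.toNat % n.toNat) : Int) = i % n := by
    rw [Int.natCast_mod, Int.toNat_of_nonneg h0, Int.toNat_of_nonneg (by omega : (0:Int) ≤ n)]
  rw [h3]
  ring

-- proof-side abbreviations
def pvArr (n m : Int) : List Int := (List.replicate m.toNat (PySem.List.pyRange 1 (n + 1) 1)).flatten
def pvK (n m : Int) : Nat := n.toNat / Nat.gcd n.toNat (m - 1).toNat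
def pvW (n m : Int) (j : Nat) : List Int :=
  (PySem.List.pyRange ((j : Int) * (m - 1)) (m + (j : Int) * (m - 1)) 1).map
    (fun i => (pvArr n m).toArray.getD i.toNat 0)

lemma pvK_pos (n m : Int) (hn : 1 ≤ n) : 1 ≤ pvK n m := by
  have hN : 0 < n.toNat := by omega
  have hg : 0 < Nat.gcd n.toNat (m - 1).toNat := Nat.gcd_pos_of_pos_left _ hN
  exact Nat.div_pos (Nat.le_of_dvd hN (Nat.gcd_dvd_left _ _)) hg

lemma pvK_le (n m : Int) : pvK n m ≤ n.toNat := Nat.div_le_self _ _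

lemma pv_bound (n m : Int) (hn : 1 ≤ n) (hm : 1 ≤ m) (k : Nat) (hk : k ≤ pvK n m) :
    (k : Int) * (m - 1) < m * n := by
  have h1 : k * (m - 1).toNat < n.toNat * ((m - 1).toNat + 1) := by
    have h2 : k * (m - 1).toNat ≤ n.toNat * (m - 1).toNat := by
      have := le_trans hk (pvK_le n m)
      exact Nat.mul_le_mul_right _ this
    have h3 : n.toNat * ((m - 1).toNat + 1) = n.toNat * (m - 1).toNat + n.toNat := by ring
    omega
  have hc1 : ((m - 1).toNat : Int) = m - 1 := by omega
  have hc2 : (n.toNat : Int) = n := by omega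
  calc (k : Int) * (m - 1) = ((k * (m - 1).toNat : Nat) : Int) := by push_cast [hc1]; ring
    _ < ((n.toNat * ((m - 1).toNat + 1) : Nat) : Int) := by exact_mod_cast h1
    _ = m * n := by push_cast [hc1, hc2]; ring

lemma pv_last_iff (n m : Int) (hn : 1 ≤ n) (hm : 1 ≤ m) (k : Nat) (h1 : 1 ≤ k) (h2 : k ≤ pvK n m) :
    ((k : Int) * (m - 1)) % n + 1 = 1 ↔ k = pvK n m := by
  have hc1 : ((m - 1).toNat : Int) = m - 1 := by omega
  have hc2 : (n.toNat : Int) = n := by omega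
  have hcast : (k : Int) * (m - 1) = ((k * (m - 1).toNat : Nat) : Int) := by push_cast [hc1]; ring
  have hdvd : ((k : Int) * (m - 1)) % n = 0 ↔ n ∣ (k : Int) * (m - 1) :=
    ⟨Int.dvd_of_emod_eq_zero, Int.emod_eq_zero_of_dvd⟩
  have hnat : n ∣ (k : Int) * (m - 1) ↔ n.toNat ∣ k * (m - 1).toNat := by
    conv_lhs => rw [hcast, ← hc2]
    rw [Int.natCast_dvd_natCast]
  have hKk : n.toNat ∣ k * (m - 1).toNat ↔ pvK n m ∣ k := pv_dvd_iff _ _ _ (by omega)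
  constructor
  · intro h
    have hd : pvK n m ∣ k := by
      rw [← hKk, ← hnat, ← hdvd]; omega
    have := Nat.le_of_dvd (by omega) hd
    omega
  · intro h
    have hd : pvK n m ∣ k := h ▸ dvd_refl _
    have : ((k : Int) * (m - 1)) % n = 0 := by
      rw [hdvd, hnat, hKk]; exact hd
    omega

lemma pvW_head (n m : Int) (hn : 1 ≤ n) (hm : 1 ≤ m) (j : Nat) (hj : (j : Int) * (m - 1) < m * n) :
    PySem.List.pyGetD (pvW n m j) 0 0 = ((j : Int) * (m - 1)) % n + 1 := by
  unfold pvW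
  rw [PySem.List.pyRange_one_cons (by omega), List.map_cons, PySem.List.pyGetD_zero_cons]
  exact pv_arr_get n m _ hn hm (by nlinarith [Int.natCast_nonneg j]) hj

lemma pvW_last (n m : Int) (hn : 1 ≤ n) (hm : 1 ≤ m) (j : Nat)
    (hj : ((j : Int) + 1) * (m - 1) < m * n) :
    PySem.List.pyGetD (pvW n m j) (-1) 0 = (((j : Int) + 1) * (m - 1)) % n + 1 := by
  unfold pvW
  have hsplit : m + (j : Int) * (m - 1) = ((j : Int) * (m - 1) + m - 1) + 1 := by ring
  rw [hsplit, PySem.List.pyRange_one_succ_right (by nlinarith [Int.natCast_nonneg j]),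
    List.map_append, List.map_singleton, PySem.List.pyGetD_neg_one_append_singleton]
  have harg : (j : Int) * (m - 1) + m - 1 = ((j : Int) + 1) * (m - 1) := by ring
  rw [harg]
  exact pv_arr_get n m _ hn hm (by nlinarith [Int.natCast_nonneg j]) hj

lemma pv_loop (n m : Int) (hn : 1 ≤ n) (hm : 1 ≤ m) :
    ∀ (fuel j : Nat) (pt : List Int) (acc : List (List Int)),
      j ≤ pvK n m → pvK n m - j ≤ fuel →
      (PySem.List.pyGetD pt (-1) 0 = 1 ↔ j = pvK n m) →
      pvLoopA (pvArr n m).toArray m fuel pt acc ((j : Int) * (m - 1)) =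
        ((List.range (pvK n m - j)).map (fun t => pvW n m (j + t))).reverse ++ acc := by
  intro fuel
  induction fuel with
  | zero =>
    intro j pt acc hj hfuel _
    have : pvK n m - j = 0 := by omega
    simp [pvLoopA, this]
  | succ fuel ih =>
    intro j pt acc hj hfuel hiff
    by_cases hjK : j = pvK n m
    · have h1 : PySem.List.pyGetD pt (-1) 0 = 1 := hiff.mpr hjK
      have h0 : pvK n m - j = 0 := by omega
      simp [pvLoopA, h1, h0]
    · have hlt : j < pvK n m := by omega
      have hne : PySem.List.pyGetD pt (-1) 0 ≠ 1 := fun h => hjK (hiff.mp h)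
      rw [pvLoopA, if_pos hne]
      have hcnt : (j : Int) * (m - 1) + m - 1 = ((j + 1 : Nat) : Int) * (m - 1) := by
        push_cast; ring
      have hw : (PySem.List.pyRange ((j : Int) * (m - 1)) (m + (j : Int) * (m - 1)) 1).map
          (fun i => (pvArr n m).toArray.getD i.toNat 0) = pvW n m j := rfl
      rw [hw, hcnt]
      have hlast : PySem.List.pyGetD (pvW n m j) (-1) 0 = 1 ↔ j + 1 = pvK n m := by
        rw [pvW_last n m hn hm j (by
          have := pv_bound n m hn hm (j + 1) (by omega)
          push_cast at this; linarith)]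
        have : ((j : Int) + 1) = ((j + 1 : Nat) : Int) := by push_cast; ring
        rw [this]
        exact pv_last_iff n m hn hm (j + 1) (by omega) (by omega)
      rw [ih (j + 1) (pvW n m j) (pvW n m j :: acc) (by omega) (by omega) hlast]
      have hrange : pvK n m - j = (pvK n m - (j + 1)) + 1 := by omega
      rw [hrange, List.range_succ_eq_map, List.map_cons, List.map_map,
        List.reverse_cons, List.append_assoc, List.singleton_append, Nat.add_zero]
      congr 3
      funext t
      simp only [Function.comp_apply]
      congr 1
      omega

lemma pv_main (n m : Int) (hn : 1 ≤ n) (hm : 1 ≤ m) :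
    circular_array_path n m = circular_array_path_alt n m := by
  have hK1 := pvK_pos n m hn
  have hKle := pvK_le n m
  -- A side
  have hloop := pv_loop n m hn hm (n.toNat + 1) 0 [0] [] (by omega) (by omega)
    (by
      constructor
      · intro h
        have : PySem.List.pyGetD ([] ++ [(0:Int)]) (-1) 0 = (0:Int) :=
          PySem.List.pyGetD_neg_one_append_singleton [] 0 0
        simp at this
        omega
      · omega)
  simp only [Nat.cast_zero, zero_mul, Nat.sub_zero, List.append_nil, Nat.zero_add] at hloop
  have hA : circular_array_path n m =
      (List.range (pvK n m)).map
        (fun (t : Nat) => PySem.Int.toStr (((t : Int) * (m - 1)) % n + 1)) := by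
    have hLHS : circular_array_path n m =
        ((pvLoopA (pvArr n m).toArray m (n.toNat + 1) [0] [] 0).reverse).map
          (fun w => PySem.Int.toStr (PySem.List.pyGetD w 0 0)) := rfl
    rw [hLHS, hloop, List.reverse_reverse, List.map_map]
    apply List.map_congr_left
    intro t ht
    rw [List.mem_range] at ht
    simp only [Function.comp_apply]
    rw [pvW_head n m hn hm t (pv_bound n m hn hm t (by omega))]
  -- B side
  have hgcd : Int.gcd n (m - 1) = Nat.gcd n.toNat (m - 1).toNat := by
    unfold Int.gcd
    congr 1 <;> omega
  have hgpos : (0 : Int) < (Int.gcd n (m - 1) : Nat) := by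
    rw [hgcd]
    exact_mod_cast Nat.gcd_pos_of_pos_left _ (by omega : 0 < n.toNat)
  have hdiv : PySem.Int.floordiv n (Int.gcd n (m - 1) : Nat) = ((pvK n m : Nat) : Int) := by
    rw [PySem.Int.floordiv_eq_ediv_of_pos hgpos, hgcd]
    rw [show n = ((n.toNat : Nat) : Int) by omega, ← Int.natCast_div]
    rfl
  have hB : circular_array_path_alt n m =
      (List.range (pvK n m)).map
        (fun (t : Nat) => PySem.Int.toStr (((t : Int) * (m - 1)) % n + 1)) := by
    have hRHS : circular_array_path_alt n m =
        (PySem.List.pyRange 0 (PySem.Int.floordiv n (Int.gcd n (m - 1) : Nat)) 1).map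
          (fun k => PySem.Int.toStr (PySem.Int.mod (k * (m - 1)) n + 1)) := rfl
    rw [hRHS, hdiv, PySem.List.pyRange_zero_natCast, List.map_map]
    apply List.map_congr_left
    intro t ht
    simp only [Function.comp_apply]
    rw [PySem.Int.mod_eq_emod_of_pos (by omega)]
  rw [hA, hB]

-- ===== VERDICT (by name: the statement is the Claim_ definition above) =====
theorem circular_array_path_spec : Claim_equal_circular_array_path := by
  intro n m _ hpre
  unfold Spec_circular_array_path
  exact pv_main n m hpre.1 hpre.2
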